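-- pv_equiv track=rewrite | github.com/hub3ps/delivery-fingerprint | scripts/shared_parser.py | _direct_impact_maps
-- ===== SOURCE A (Python) =====
-- def _direct_impact_maps(expr_rows, edges_rows):
--     """
--     Retorna:
--       impact_map: dict[source_node] -> list[(workflow, affected_node, where)]
--       adj: dict[source_node] -> set(affected_node)  (para BFS)
--     """
--     from collections import defaultdict
--     impact_map = defaultdict(list)
--     adj = defaultdict(set)
--
--     # 1) EXPRESSÕES ($node["X"]) -> alterar X impacta 'node' que usa X
--     for er in expr_rows:
--         node = er.get("node","") or ""
--         wfk  = er.get("workflow","") or ""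
--         refs = (er.get("refs","") or "").split(",")
--         for piece in refs:
--             piece = piece.strip()
--             if piece.startswith("node:"):
--                 src = piece.split(":",1)[1]
--                 if src and src != node:
--                     impact_map[src].append((wfk, node, er.get("param_path","")))
--                     adj[src].add(node)
--
--     # 2) CONEXÕES (A -> B) -> alterar A impacta diretamente B
--     for e in edges_rows:
--         wfk = e.get("workflow","") or ""
--         a   = e.get("from","") or ""
--         b   = e.get("to","") or ""
--         p   = e.get("path","") or "connection"
--         if a and b:
--             impact_map[a].append((wfk, b, f"(edge:{p})"))
--             adj[a].add(b)
--
--     return impact_map, adj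
-- ===== SOURCE B (Python) =====
-- def _expr_contribs(er):
--     node = er.get("node", "") or ""
--     wfk = er.get("workflow", "") or ""
--     out = []
--     for piece in (er.get("refs", "") or "").split(","):
--         piece = piece.strip()
--         if piece.startswith("node:"):
--             src = piece.split(":", 1)[1]
--             if src and src != node:
--                 out.append((src, (wfk, node, er.get("param_path", ""))))
--     return out
--
--
-- def _edge_contribs(e):
--     a = e.get("from", "") or ""
--     b = e.get("to", "") or ""
--     if not (a and b):
--         return []
--     p = e.get("path", "") or "connection"
--     return [(a, (e.get("workflow", "") or "", b, "(edge:%s)" % p))]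
--
--
-- def _direct_impact_maps(expr_rows, edges_rows):
--     from collections import defaultdict
--     pairs = []
--     for er in expr_rows:
--         pairs += _expr_contribs(er)
--     for e in edges_rows:
--         pairs += _edge_contribs(e)
--     impact_map = defaultdict(list)
--     for src, entry in pairs:
--         impact_map[src].append(entry)
--     adj = defaultdict(set)
--     for src, entries in impact_map.items():
--         adj[src] = {entry[1] for entry in entries}
--     return impact_map, adj
-- ===== Notes on version B (the rewrite author's own statement) =====
-- stated objective: simpler
-- what changed: B flattens both inputs into one list of (source, entry) contribution pairs via two small pure helpers, then groups that list into impact_map in one pass, and finally derives adj from impact_map's items, instead of A's interleaved maintenance of both dicts inside the nested parsing loops.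
import Mathlib
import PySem

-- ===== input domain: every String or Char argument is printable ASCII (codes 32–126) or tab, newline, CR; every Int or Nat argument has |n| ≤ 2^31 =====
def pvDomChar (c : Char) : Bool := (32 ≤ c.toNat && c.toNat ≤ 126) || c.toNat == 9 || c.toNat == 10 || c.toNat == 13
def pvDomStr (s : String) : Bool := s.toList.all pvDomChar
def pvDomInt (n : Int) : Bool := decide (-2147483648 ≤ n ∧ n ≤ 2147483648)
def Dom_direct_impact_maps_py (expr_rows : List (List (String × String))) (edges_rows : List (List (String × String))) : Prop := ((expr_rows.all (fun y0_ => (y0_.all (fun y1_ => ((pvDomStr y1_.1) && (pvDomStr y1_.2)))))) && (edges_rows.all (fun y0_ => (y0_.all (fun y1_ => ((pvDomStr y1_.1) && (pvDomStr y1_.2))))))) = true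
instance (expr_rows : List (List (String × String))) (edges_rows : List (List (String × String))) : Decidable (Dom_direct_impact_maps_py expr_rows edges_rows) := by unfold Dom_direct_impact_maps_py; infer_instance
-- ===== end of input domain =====

-- B's change: instead of maintaining impact_map and adj side by side inside the two input
-- loops, B first flattens both inputs into one list of (source, entry) contribution pairs,
-- then groups that list into impact_map, and finally derives adj from impact_map's items
-- (objective: simpler decomposition; same asymptotic cost).

-- ===== PORT A =====
-- A's per-expression-row body: two defaultdict updates inside the inner loop over refs.
-- 'er.get(k,"") or ""' is just er.get(k,"") (the 'or' only replaces "" by "").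
def exprStepA (st : PySem.Dict String (List (String × String × String)) × PySem.Dict String (PySem.Set String))
    (er : List (String × String)) :
    PySem.Dict String (List (String × String × String)) × PySem.Dict String (PySem.Set String) :=
  let d := PySem.Dict.mk er
  let node := d.getD "node" ""
  let wfk := d.getD "workflow" ""
  -- refs.split(","): separator nonempty, so split? is always some
  let refs := (PySem.Str.split? (d.getD "refs" "") ",").getD []
  refs.foldl (fun st piece0 =>
    let piece := PySem.Str.strip piece0
    if PySem.Str.startswith piece "node:" then
      -- piece.split(":",1)[1]: piece starts with "node:", so the split has ≥ 2 parts and index 1 is in range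
      let src := ((PySem.Str.splitMax? piece ":" 1).getD []).getD 1 ""
      if src ≠ "" ∧ src ≠ node then
        (st.1.modify src [] (fun l => l ++ [(wfk, node, d.getD "param_path" "")]),
         st.2.modify src PySem.Set.empty (fun s => s.add node))
      else st
    else st) st

-- A's per-edge-row body
def edgeStepA (st : PySem.Dict String (List (String × String × String)) × PySem.Dict String (PySem.Set String))
    (e : List (String × String)) :
    PySem.Dict String (List (String × String × String)) × PySem.Dict String (PySem.Set String) :=
  let d := PySem.Dict.mk e
  let wfk := d.getD "workflow" ""
  let a := d.getD "from" ""
  let b := d.getD "to" ""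
  let p0 := d.getD "path" ""
  let p := if p0 = "" then "connection" else p0   -- e.get("path","") or "connection"
  if a ≠ "" ∧ b ≠ "" then
    (st.1.modify a [] (fun l => l ++ [(wfk, b, "(edge:" ++ p ++ ")")]),
     st.2.modify a PySem.Set.empty (fun s => s.add b))
  else st

def direct_impact_maps_py (expr_rows : List (List (String × String))) (edges_rows : List (List (String × String))) : (List (String × List (String × String × String))) × (List (String × List String)) :=
  let st := edges_rows.foldl edgeStepA (expr_rows.foldl exprStepA (PySem.Dict.empty, PySem.Dict.empty))
  (st.1.items, st.2.items)

-- ===== PORT B =====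
-- _expr_contribs of Source B
def exprContribs (er : List (String × String)) : List (String × (String × String × String)) :=
  let d := PySem.Dict.mk er
  let node := d.getD "node" ""
  let wfk := d.getD "workflow" ""
  ((PySem.Str.split? (d.getD "refs" "") ",").getD []).foldl (fun out piece0 =>
    let piece := PySem.Str.strip piece0
    if PySem.Str.startswith piece "node:" then
      let src := ((PySem.Str.splitMax? piece ":" 1).getD []).getD 1 ""   -- in range: piece starts with "node:"
      if src ≠ "" ∧ src ≠ node then out ++ [(src, (wfk, node, d.getD "param_path" ""))] else out
    else out) []

-- _edge_contribs of Source B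
def edgeContribs (e : List (String × String)) : List (String × (String × String × String)) :=
  let d := PySem.Dict.mk e
  let a := d.getD "from" ""
  let b := d.getD "to" ""
  if ¬(a ≠ "" ∧ b ≠ "") then []
  else
    let p0 := d.getD "path" ""
    let p := if p0 = "" then "connection" else p0
    [(a, (d.getD "workflow" "", b, "(edge:" ++ p ++ ")"))]

def direct_impact_maps_py_alt (expr_rows : List (List (String × String))) (edges_rows : List (List (String × String))) : (List (String × List (String × String × String))) × (List (String × List String)) :=
  let pairs := edges_rows.foldl (fun acc e => acc ++ edgeContribs e)
                 (expr_rows.foldl (fun acc er => acc ++ exprContribs er) [])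
  let impact := pairs.foldl (fun d p => d.modify p.1 [] (fun l => l ++ [p.2]))
                  (PySem.Dict.empty : PySem.Dict String (List (String × String × String)))
  let adj := impact.items.foldl (fun d q => d.insert q.1 (PySem.Set.ofList (q.2.map (fun t => t.2.1))))
               (PySem.Dict.empty : PySem.Dict String (PySem.Set String))
  (impact.items, adj.items)

-- ===== PRECONDITION & SPEC =====
def Spec_direct_impact_maps_py (expr_rows : List (List (String × String))) (edges_rows : List (List (String × String))) (out : (List (String × List (String × String × String))) × (List (String × List String))) : Prop := out = direct_impact_maps_py_alt expr_rows edges_rows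
instance (expr_rows : List (List (String × String))) (edges_rows : List (List (String × String))) (out : (List (String × List (String × String × String))) × (List (String × List String))) : Decidable (Spec_direct_impact_maps_py expr_rows edges_rows out) := by unfold Spec_direct_impact_maps_py; infer_instance

-- ===== CLAIM (what is proved, stated in full; the proofs are below) =====
def Claim_equal_direct_impact_maps_py : Prop := ∀ (expr_rows : List (List (String × String))) (edges_rows : List (List (String × String))), Dom_direct_impact_maps_py expr_rows edges_rows → Spec_direct_impact_maps_py expr_rows edges_rows (direct_impact_maps_py expr_rows edges_rows)

-- ===== LEMMAS AND PROOFS =====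

-- the two dict-update halves of A's combined step, acting on one contribution pair
def imStep (d : PySem.Dict String (List (String × String × String))) (p : String × (String × String × String)) :
    PySem.Dict String (List (String × String × String)) :=
  d.modify p.1 [] (fun l => l ++ [p.2])

def adjStep (d : PySem.Dict String (PySem.Set String)) (p : String × (String × String × String)) :
    PySem.Dict String (PySem.Set String) :=
  d.modify p.1 PySem.Set.empty (fun s => s.add p.2.2.1)

def pairStep (st : PySem.Dict String (List (String × String × String)) × PySem.Dict String (PySem.Set String))
    (p : String × (String × String × String)) :
    PySem.Dict String (List (String × String × String)) × PySem.Dict String (PySem.Set String) :=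
  (imStep st.1 p, adjStep st.2 p)

-- one ref piece's contribution (parametrised by the row context)
def pieceContrib (node wfk pp : String) (piece0 : String) : List (String × (String × String × String)) :=
  let piece := PySem.Str.strip piece0
  if PySem.Str.startswith piece "node:" then
    let src := ((PySem.Str.splitMax? piece ":" 1).getD []).getD 1 ""
    if src ≠ "" ∧ src ≠ node then [(src, (wfk, node, pp))] else []
  else []

theorem foldl_flatMap_foldl {α β γ : Type} (l : List α) (g : α → List β) (f : γ → β → γ) (init : γ) :
    l.foldl (fun st x => (g x).foldl f st) init = (l.flatMap g).foldl f init := by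
  induction l generalizing init with
  | nil => rfl
  | cons a l ih => simp [List.foldl_append, ih]

theorem exprContribs_eq (er : List (String × String)) :
    exprContribs er =
      ((PySem.Str.split? ((PySem.Dict.mk er).getD "refs" "") ",").getD []).flatMap
        (pieceContrib ((PySem.Dict.mk er).getD "node" "") ((PySem.Dict.mk er).getD "workflow" "")
          ((PySem.Dict.mk er).getD "param_path" "")) := by
  simp only [exprContribs]
  rw [PySem.List.foldl_congr_mem _ _
      (fun out piece0 => out ++ pieceContrib ((PySem.Dict.mk er).getD "node" "")
        ((PySem.Dict.mk er).getD "workflow" "") ((PySem.Dict.mk er).getD "param_path" "") piece0) _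
      (by intro acc x _; simp only [pieceContrib]; split_ifs <;> simp),
    PySem.List.foldl_append_eq_flatMap, List.nil_append]

theorem exprStepA_eq (st : PySem.Dict String (List (String × String × String)) × PySem.Dict String (PySem.Set String))
    (er : List (String × String)) :
    exprStepA st er = (exprContribs er).foldl pairStep st := by
  rw [exprContribs_eq]
  simp only [exprStepA]
  rw [PySem.List.foldl_congr_mem _ _
      (fun st piece0 => (pieceContrib ((PySem.Dict.mk er).getD "node" "")
        ((PySem.Dict.mk er).getD "workflow" "") ((PySem.Dict.mk er).getD "param_path" "") piece0).foldl pairStep st) _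
      (by intro acc x _; simp only [pieceContrib]; split_ifs <;> simp [pairStep, imStep, adjStep]),
    foldl_flatMap_foldl]

theorem edgeStepA_eq (st : PySem.Dict String (List (String × String × String)) × PySem.Dict String (PySem.Set String))
    (e : List (String × String)) :
    edgeStepA st e = (edgeContribs e).foldl pairStep st := by
  simp only [edgeStepA, edgeContribs]
  split_ifs with h1 h2 <;> simp_all [pairStep, imStep, adjStep]

theorem foldl_pairStep_split (l : List (String × (String × String × String)))
    (st : PySem.Dict String (List (String × String × String)) × PySem.Dict String (PySem.Set String)) :
    l.foldl pairStep st = (l.foldl imStep st.1, l.foldl adjStep st.2) := by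
  induction l generalizing st with
  | nil => rfl
  | cons p l ih => simp [List.foldl_cons, ih, pairStep]

theorem adj_getD (l : List (String × (String × String × String))) (d : PySem.Dict String (PySem.Set String)) (c : String) :
    (l.foldl adjStep d).getD c PySem.Set.empty =
      PySem.Set.update (d.getD c PySem.Set.empty) ((l.filter (fun p => p.1 == c)).map (fun p => p.2.2.1)) := by
  induction l generalizing d with
  | nil => simp [PySem.Set.update_nil]
  | cons p l ih =>
    simp only [List.foldl_cons, ih]
    by_cases h : p.1 = c
    · subst h
      simp [adjStep, PySem.Set.update_cons, PySem.Dict.getD_modify_self]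
    · have hb : (p.1 == c) = false := by simp [h]
      simp [adjStep, PySem.Dict.getD_modify, Ne.symm h, hb]

-- the final-state fact: adj built alongside equals adj derived from the grouped impact map
theorem adj_items_eq (l : List (String × (String × String × String))) :
    (l.foldl adjStep (PySem.Dict.empty : PySem.Dict String (PySem.Set String))).items =
      ((l.foldl imStep (PySem.Dict.empty : PySem.Dict String (List (String × String × String)))).items.foldl
        (fun d q => d.insert q.1 (PySem.Set.ofList (q.2.map (fun t => t.2.1))))
        (PySem.Dict.empty : PySem.Dict String (PySem.Set String))).items := by
  have him_keys : (l.foldl imStep PySem.Dict.empty).keys = PySem.Set.ofList (l.map (fun p => p.1)) := by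
    simpa [imStep, PySem.Dict.keys_empty, PySem.Set.update_nil_left] using
      PySem.Dict.keys_foldl_modify_key l (fun p => p.1) [] (fun _ p l => l ++ [p.2]) PySem.Dict.empty
  have hadj_keys : (l.foldl adjStep PySem.Dict.empty).keys = PySem.Set.ofList (l.map (fun p => p.1)) := by
    simpa [adjStep, PySem.Dict.keys_empty, PySem.Set.update_nil_left] using
      PySem.Dict.keys_foldl_modify_key l (fun p => p.1) PySem.Set.empty (fun _ p s => s.add p.2.2.1) PySem.Dict.empty
  have him_nodup : (l.foldl imStep PySem.Dict.empty).keys.Nodup := by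
    have := PySem.Dict.nodup_keys_foldl_modify_key l (fun p => p.1) [] (fun _ p l => l ++ [p.2]) PySem.Dict.empty
      (by simp [PySem.Dict.keys_empty])
    simpa [imStep] using this
  have hadj_nodup : (l.foldl adjStep PySem.Dict.empty).keys.Nodup := by
    have := PySem.Dict.nodup_keys_foldl_modify_key l (fun p => p.1) PySem.Set.empty (fun _ p s => s.add p.2.2.1) PySem.Dict.empty
      (by simp [PySem.Dict.keys_empty])
    simpa [adjStep] using this
  have him_getD : ∀ c, (l.foldl imStep PySem.Dict.empty).getD c [] =
      (l.filter (fun p => p.1 == c)).map (fun p => p.2) := by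
    intro c
    simpa [imStep, PySem.Dict.getD_empty] using
      PySem.Dict.getD_foldl_modify_append l (PySem.Dict.empty : PySem.Dict String (List (String × String × String))) c
  have hadj_getD : ∀ c, (l.foldl adjStep PySem.Dict.empty).getD c ([] : PySem.Set String) =
      PySem.Set.ofList ((l.filter (fun p => p.1 == c)).map (fun p => p.2.2.1)) := by
    intro c
    simpa [PySem.Dict.getD_empty, PySem.Set.update_nil_left] using adj_getD l PySem.Dict.empty c
  have hitems : (l.foldl imStep PySem.Dict.empty).items =
      (l.foldl imStep PySem.Dict.empty).keys.map (fun k => (k, (l.foldl imStep PySem.Dict.empty).getD k [])) :=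
    PySem.Dict.items_eq_map_keys _ him_nodup []
  have hfresh : ((l.foldl imStep PySem.Dict.empty).items.foldl
        (fun d q => d.insert q.1 (PySem.Set.ofList (q.2.map (fun t => t.2.1))))
        (PySem.Dict.empty : PySem.Dict String (PySem.Set String))).items =
      (l.foldl imStep PySem.Dict.empty).items.map (fun q => (q.1, PySem.Set.ofList (q.2.map (fun t => t.2.1)))) := by
    have := PySem.Dict.items_foldl_insert_fresh (l.foldl imStep PySem.Dict.empty).items
      (fun q => q.1) (fun q => PySem.Set.ofList (q.2.map (fun t => t.2.1)))
      (PySem.Dict.empty : PySem.Dict String (PySem.Set String))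
      (by intro a _; exact PySem.Dict.contains_empty _)
      (by simpa [PySem.Dict.keys] using him_nodup)
    simpa using this
  rw [hfresh, PySem.Dict.items_eq_map_keys _ hadj_nodup PySem.Set.empty, hadj_keys, hitems, him_keys,
    List.map_map]
  refine List.map_congr_left ?_
  intro k _
  simp only [Function.comp_def, him_getD, List.map_map]
  exact congrArg (Prod.mk k) (hadj_getD k)

-- ===== VERDICT (by name: the statement is the Claim_ definition above) =====
theorem direct_impact_maps_py_spec : Claim_equal_direct_impact_maps_py := by
  intro expr_rows edges_rows _
  simp only [Spec_direct_impact_maps_py, direct_impact_maps_py, direct_impact_maps_py_alt]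
  rw [PySem.List.foldl_append_eq_flatMap exprContribs expr_rows []]
  rw [PySem.List.foldl_append_eq_flatMap edgeContribs edges_rows _]
  rw [PySem.List.foldl_congr_mem expr_rows exprStepA (fun st er => (exprContribs er).foldl pairStep st) _
      (fun st er _ => exprStepA_eq st er)]
  rw [PySem.List.foldl_congr_mem edges_rows edgeStepA (fun st e => (edgeContribs e).foldl pairStep st) _
      (fun st e _ => edgeStepA_eq st e)]
  rw [foldl_flatMap_foldl expr_rows exprContribs pairStep _,
    foldl_flatMap_foldl edges_rows edgeContribs pairStep _, ← List.foldl_append]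
  rw [foldl_pairStep_split]
  simp only [List.nil_append]
  exact congrArg₂ Prod.mk rfl (adj_items_eq _)
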